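-- pv_equiv track=rewrite | github.com/reskino/vesper | python-backend/token_reducer.py | _dedup_lines
-- ===== SOURCE A (Python) =====
-- def _dedup_lines(lines: list[str], threshold: int = 3) -> list[str]:
--     """Collapse consecutive duplicate lines with a count."""
--     if not lines:
--         return lines
--     out: list[str] = []
--     i = 0
--     while i < len(lines):
--         line = lines[i]
--         count = 1
--         while i + count < len(lines) and lines[i + count] == line:
--             count += 1
--         if count >= threshold:
--             out.append(f"{line}  [×{count}]")
--         else:
--             out.extend([line] * count)
--         i += count
--     return out
-- ===== SOURCE B (Python) =====
-- def _dedup_lines(lines: list[str], threshold: int = 3) -> list[str]: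
--     """Collapse consecutive duplicate lines with a count (single streaming pass)."""
--     out: list[str] = []
--     prev, count = None, 0
--     for line in lines:
--         if count and line == prev:
--             count += 1
--         else:
--             _flush(out, prev, count, threshold)
--             prev, count = line, 1
--     _flush(out, prev, count, threshold)
--     return out
--
--
-- def _flush(out: list[str], line, count: int, threshold: int) -> None:
--     if count == 0:
--         return
--     if count >= threshold:
--         out.append(f"{line}  [×{count}]")
--     else:
--         out.extend([line] * count)
-- ===== Notes on version B (the rewrite author's own statement) =====
-- stated objective: alternative
-- what changed: Replaced A's index-based outer while-loop with an inner lookahead while-loop counting each run by a single streaming for-loop that tracks the previous line and current run count and flushes each finished run (plus one final flush); one pass with no per-run inner rescans.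
import Mathlib
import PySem

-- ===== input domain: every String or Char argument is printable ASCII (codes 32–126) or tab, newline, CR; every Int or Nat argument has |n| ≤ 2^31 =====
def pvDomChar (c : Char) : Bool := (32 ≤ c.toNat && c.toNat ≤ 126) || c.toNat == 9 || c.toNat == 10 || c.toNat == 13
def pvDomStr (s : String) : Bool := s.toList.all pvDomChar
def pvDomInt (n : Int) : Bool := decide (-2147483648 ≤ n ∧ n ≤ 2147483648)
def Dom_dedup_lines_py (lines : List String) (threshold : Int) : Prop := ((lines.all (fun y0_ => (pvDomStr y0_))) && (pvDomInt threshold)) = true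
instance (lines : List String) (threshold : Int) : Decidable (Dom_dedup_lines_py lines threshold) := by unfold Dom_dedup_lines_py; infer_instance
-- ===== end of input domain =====

-- B replaces A's index arithmetic and inner counting while-loop by a single streaming
-- pass that tracks the previous line and run count, flushing each finished run (objective: alternative).

-- f"{line}  [×{count}]"
def pvFmt (line : String) (count : Int) : String :=
  line ++ "  [×" ++ PySem.Int.toStr count ++ "]"

-- ===== PORT A =====
-- inner while: count the run length starting at index i (index always in range, so getD is exact)
def pvCountA (lines : List String) (line : String) (i : Nat) (count : Nat) : Nat :=
  if i + count < lines.length ∧ lines.getD (i + count) "" == line then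
    pvCountA lines line i (count + 1)
  else count
termination_by lines.length - (i + count)
decreasing_by omega

theorem pvCountA_ge (lines : List String) (line : String) (i c : Nat) :
    c ≤ pvCountA lines line i c := by
  fun_induction pvCountA lines line i c <;> omega

-- outer while over the index i, accumulating out
def pvLoopA (lines : List String) (threshold : Int) (i : Nat) (out : List String) : List String :=
  if i < lines.length then
    let line := lines.getD i ""
    let count := pvCountA lines line i 1
    let out' := if (count : Int) ≥ threshold then out ++ [pvFmt line (count : Int)]
                else out ++ List.replicate count line
    pvLoopA lines threshold (i + count) out'
  else out
termination_by lines.length - i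
decreasing_by
  have := pvCountA_ge lines (lines.getD i "") i 1
  omega

def dedup_lines_py (lines : List String) (threshold : Int) : List String :=
  if lines.isEmpty then lines
  else pvLoopA lines threshold 0 []

-- ===== PORT B =====
-- _flush helper: append the finished run (nothing to do when count == 0)
def pvFlushB (out : List String) (line : Option String) (count : Nat) (threshold : Int) : List String :=
  if count = 0 then out
  else
    let l := line.getD ""   -- only reachable with count ≠ 0, where line is `some`
    if (count : Int) ≥ threshold then out ++ [pvFmt l (count : Int)]
    else out ++ List.replicate count l

-- one iteration of B's for-loop over state (out, prev, count)
def pvStepB (threshold : Int) (st : List String × Option String × Nat) (line : String) :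
    List String × Option String × Nat :=
  if st.2.2 ≠ 0 ∧ some line == st.2.1 then (st.1, st.2.1, st.2.2 + 1)
  else (pvFlushB st.1 st.2.1 st.2.2 threshold, some line, 1)

def dedup_lines_py_alt (lines : List String) (threshold : Int) : List String :=
  let st := lines.foldl (pvStepB threshold) ([], none, 0)
  pvFlushB st.1 st.2.1 st.2.2 threshold

-- ===== PRECONDITION & SPEC =====
def Spec_dedup_lines_py (lines : List String) (threshold : Int) (out : List String) : Prop := out = dedup_lines_py_alt lines threshold
instance (lines : List String) (threshold : Int) (out : List String) : Decidable (Spec_dedup_lines_py lines threshold out) := by unfold Spec_dedup_lines_py; infer_instance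

-- ===== CLAIM (what is proved, stated in full; the proofs are below) =====
def Claim_equal_dedup_lines_py : Prop := ∀ (lines : List String) (threshold : Int), Dom_dedup_lines_py lines threshold → Spec_dedup_lines_py lines threshold (dedup_lines_py lines threshold)

-- ===== LEMMAS AND PROOFS =====

-- the common specification: run-length collapse, stated via takeWhile/dropWhile
def pvChunk (line : String) (count : Nat) (threshold : Int) : List String :=
  if (count : Int) ≥ threshold then [pvFmt line (count : Int)] else List.replicate count line

def pvRuns (lines : List String) (threshold : Int) : List String :=
  match lines with
  | [] => []
  | x :: xs =>
      pvChunk x (1 + (xs.takeWhile (· == x)).length) threshold ++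
        pvRuns (xs.dropWhile (· == x)) threshold
termination_by lines.length
decreasing_by
  have := List.length_dropWhile_le (· == x) xs
  simp; omega

theorem pvFlushB_eq (out : List String) (p : String) (count : Nat) (t : Int) (hc : count ≠ 0) :
    pvFlushB out (some p) count t = out ++ pvChunk p count t := by
  unfold pvFlushB pvChunk
  rw [if_neg hc]
  split <;> simp

theorem pvCountA_eq (lines : List String) (line : String) (i c : Nat) :
    pvCountA lines line i c = c + ((lines.drop (i + c)).takeWhile (· == line)).length := by
  fun_induction pvCountA lines line i c with
  | case1 c h ih =>
      obtain ⟨hlt, heq⟩ := h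
      rw [List.getD_eq_getElem _ _ hlt] at heq
      rw [ih, List.drop_eq_getElem_cons hlt,
        List.takeWhile_cons_of_pos (p := fun x => x == line) heq, List.length_cons]
      simp only [Nat.add_assoc]
      omega
  | case2 c h =>
      by_cases hlt : i + c < lines.length
      · rw [List.drop_eq_getElem_cons hlt]
        have hne : ¬ (lines[i+c] == line) = true := by
          intro hc; exact h ⟨hlt, by rw [List.getD_eq_getElem _ _ hlt]; exact hc⟩
        simp [hne]
      · rw [List.drop_eq_nil_iff.mpr (by omega)]
        simp

theorem drop_takeWhile_length {α : Type} (p : α → Bool) (l : List α) :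
    l.drop (l.takeWhile p).length = l.dropWhile p := by
  induction l with
  | nil => simp
  | cons x xs ih =>
      by_cases hx : p x <;>
        simp [hx, ih]

theorem pvLoopA_eq (lines : List String) (threshold : Int) (i : Nat) (out : List String) :
    pvLoopA lines threshold i out = out ++ pvRuns (lines.drop i) threshold := by
  fun_induction pvLoopA lines threshold i out with
  | case1 i out h line count out' ih =>
      simp only [out', count, line] at ih ⊢
      set L := lines.getD i "" with hL
      set c := pvCountA lines L i 1 with hc
      have hcount : c = 1 + ((lines.drop (i + 1)).takeWhile (· == L)).length := by
        rw [hc]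
        simpa [Nat.add_comm] using pvCountA_eq lines L i 1
      have hline : lines.drop i = L :: lines.drop (i + 1) := by
        rw [List.drop_eq_getElem_cons h, hL, List.getD_eq_getElem _ _ h]
      have hdrop : lines.drop (i + c) = (lines.drop (i + 1)).dropWhile (· == L) := by
        rw [show i + c = (i + 1) + ((lines.drop (i + 1)).takeWhile (· == L)).length by omega]
        rw [← List.drop_drop, drop_takeWhile_length]
      rw [ih, hdrop, hline, pvRuns, ← hcount, ← List.append_assoc]
      congr 1
      unfold pvChunk
      split <;> simp
  | case2 i out h =>
      rw [List.drop_eq_nil_iff.mpr (by omega), pvRuns]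
      simp

theorem pvFoldB_eq (threshold : Int) (xs : List String) (out : List String) (p : String)
    (count : Nat) (hc : 1 ≤ count) :
    (let st := xs.foldl (pvStepB threshold) (out, some p, count)
     pvFlushB st.1 st.2.1 st.2.2 threshold) =
      out ++ pvChunk p (count + (xs.takeWhile (· == p)).length) threshold ++
        pvRuns (xs.dropWhile (· == p)) threshold := by
  induction xs generalizing out p count with
  | nil =>
      simp only [List.foldl_nil, List.takeWhile_nil, List.dropWhile_nil, pvRuns,
        List.length_nil, Nat.add_zero, List.append_nil]
      exact pvFlushB_eq out p count threshold (by omega)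
  | cons x xs ih =>
      simp only [List.foldl_cons]
      by_cases hx : (x == p) = true
      · have hstep : pvStepB threshold (out, some p, count) x = (out, some p, count + 1) := by
          simp [pvStepB, hx]
          omega
        rw [hstep, ih out p (count + 1) (by omega)]
        have hxp : x = p := by simpa using hx
        subst hxp
        rw [List.takeWhile_cons_of_pos (by simp), List.dropWhile_cons_of_pos (by simp)]
        have harith : count + 1 + (xs.takeWhile (· == x)).length =
            count + (x :: xs.takeWhile (· == x)).length := by simp; omega
        rw [harith]
      · have hstep : pvStepB threshold (out, some p, count) x =
            (pvFlushB out (some p) count threshold, some x, 1) := by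
          simp [pvStepB, hx]
        rw [hstep, ih _ x 1 (by omega)]
        rw [pvFlushB_eq out p count threshold (by omega)]
        rw [List.takeWhile_cons_of_neg (by simpa using hx),
          List.dropWhile_cons_of_neg (by simpa using hx)]
        rw [pvRuns]
        simp [List.append_assoc]

theorem alt_eq_runs (lines : List String) (threshold : Int) :
    dedup_lines_py_alt lines threshold = pvRuns lines threshold := by
  cases lines with
  | nil => simp [dedup_lines_py_alt, pvFlushB, pvRuns]
  | cons x xs =>
      unfold dedup_lines_py_alt
      simp only [List.foldl_cons]
      have hstep : pvStepB threshold ([], none, 0) x = ([], some x, 1) := by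
        simp [pvStepB, pvFlushB]
      rw [hstep]
      have h := pvFoldB_eq threshold xs [] x 1 (by omega)
      simp only at h
      rw [h, pvRuns]
      simp

theorem a_eq_runs (lines : List String) (threshold : Int) :
    dedup_lines_py lines threshold = pvRuns lines threshold := by
  unfold dedup_lines_py
  split
  · next h => simp_all [List.isEmpty_iff, pvRuns]
  · rw [pvLoopA_eq]
    simp

-- ===== VERDICT (by name: the statement is the Claim_ definition above) =====
theorem dedup_lines_py_spec : Claim_equal_dedup_lines_py := by
  intro lines threshold _
  unfold Spec_dedup_lines_py
  rw [a_eq_runs, alt_eq_runs]
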